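-- pv_equiv track=rewrite | github.com/reyhanarief/TemuDoc | app.py | format_stemmed_content
-- ===== SOURCE A (Python) =====
-- from collections import Counter
--
-- def format_stemmed_content(stemmed_words):
--     word_counts = Counter(stemmed_words)
--     formatted_content = []
--     for word, count in word_counts.items():
--         if count > 1:
--             formatted_content.append(f"{word} ({count}x)")
--         else:
--             formatted_content.append(word)
--     return ', '.join(formatted_content)
-- ===== SOURCE B (Python) =====
-- def format_stemmed_content(stemmed_words):
--     parts = []
--     remaining = list(stemmed_words)
--     while remaining:
--         word = remaining[0]
--         count = remaining.count(word)
--         parts.append(f"{word} ({count}x)" if count > 1 else word)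
--         remaining = [x for x in remaining if x != word]
--     return ', '.join(parts)
-- ===== Notes on version B (the rewrite author's own statement) =====
-- stated objective: alternative
-- what changed: Replaces the Counter tabulation plus items loop with a peel-off while loop: repeatedly take the head word of a shrinking work list, count it there, format it, and filter all its occurrences out before the next iteration.
import Mathlib
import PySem

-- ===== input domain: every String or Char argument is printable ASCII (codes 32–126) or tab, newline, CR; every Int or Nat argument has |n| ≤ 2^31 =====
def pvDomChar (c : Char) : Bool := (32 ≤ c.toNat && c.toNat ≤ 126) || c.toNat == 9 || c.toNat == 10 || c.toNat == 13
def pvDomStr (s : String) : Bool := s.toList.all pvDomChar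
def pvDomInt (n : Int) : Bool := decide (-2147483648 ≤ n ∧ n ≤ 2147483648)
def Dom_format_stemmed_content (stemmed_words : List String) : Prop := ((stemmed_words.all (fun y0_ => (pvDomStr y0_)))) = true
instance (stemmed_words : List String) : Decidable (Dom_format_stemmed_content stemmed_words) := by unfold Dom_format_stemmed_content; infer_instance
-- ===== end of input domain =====

-- B replaces A's Counter tabulation + items loop with a peel-off while loop over a shrinking
-- work list: count and format the head word, then filter its occurrences out (alternative decomposition, same result).

-- ===== PORT A =====
def format_stemmed_content (stemmed_words : List String) : String :=
  let word_counts := PySem.Dict.counter stemmed_words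
  let formatted_content := word_counts.items.foldl
    (fun acc (p : String × Int) =>
      if p.2 > 1 then acc ++ [p.1 ++ " (" ++ PySem.Int.toStr p.2 ++ "x)"]
      else acc ++ [p.1]) []
  PySem.Str.join ", " formatted_content

-- ===== PORT B =====
-- the while loop: peel off the head word with its count, filter out its occurrences
def pvPeel : List String → List String → List String
  | [], parts => parts
  | word :: tail, parts =>
    let count : Int := (PySem.List.count (word :: tail) word : Int)
    let part : String := if count > 1 then word ++ " (" ++ PySem.Int.toStr count ++ "x)" else word
    pvPeel ((word :: tail).filter (fun x => x != word)) (parts ++ [part])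
termination_by remaining _ => remaining.length
decreasing_by
  simp only [List.filter_cons, bne_self_eq_false, Bool.false_eq_true, if_false]
  exact Nat.lt_succ_of_le (List.length_filter_le _ _)

def format_stemmed_content_alt (stemmed_words : List String) : String :=
  PySem.Str.join ", " (pvPeel stemmed_words [])

-- ===== PRECONDITION & SPEC =====
def Spec_format_stemmed_content (stemmed_words : List String) (out : String) : Prop := out = format_stemmed_content_alt stemmed_words
instance (stemmed_words : List String) (out : String) : Decidable (Spec_format_stemmed_content stemmed_words out) := by unfold Spec_format_stemmed_content; infer_instance

-- ===== CLAIM (what is proved, stated in full; the proofs are below) =====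
def Claim_equal_format_stemmed_content : Prop := ∀ (stemmed_words : List String), Dom_format_stemmed_content stemmed_words → Spec_format_stemmed_content stemmed_words (format_stemmed_content stemmed_words)

-- ===== LEMMAS AND PROOFS =====

-- the common formatting of one word with its count
def pvFmt (k : String) (c : Int) : String :=
  if c > 1 then k ++ " (" ++ PySem.Int.toStr c ++ "x)" else k

-- A's append-accumulating loop over the items list is a map.
theorem fmt_foldl_eq_map (l : List (String × Int)) (acc : List String) :
    l.foldl (fun acc (p : String × Int) =>
      if p.2 > 1 then acc ++ [p.1 ++ " (" ++ PySem.Int.toStr p.2 ++ "x)"]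
      else acc ++ [p.1]) acc
    = acc ++ l.map (fun p => pvFmt p.1 p.2) := by
  induction l generalizing acc with
  | nil => simp
  | cons h t ih => simp [List.foldl_cons, ih, pvFmt]; split_ifs <;> simp

-- foldl of Set.add starting from a::s peels off a and filters a out of the rest
theorem foldl_add_cons (a : String) (l : List String) (s : List String) :
    l.foldl PySem.Set.add (a :: s) = a :: (l.filter (fun x => x != a)).foldl PySem.Set.add s := by
  induction l generalizing s with
  | nil => simp
  | cons x t ih =>
    by_cases hxa : x = a
    · subst hxa
      simp [PySem.Set.add, List.foldl_cons, ih]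
    · have hne : (x != a) = true := by simpa using hxa
      simp only [List.foldl_cons, List.filter_cons, hne, if_pos, PySem.Set.add]
      by_cases hs : x ∈ s
      · have h1 : PySem.Set.contains (a :: s) x = true := by simp [PySem.Set.contains, hs]
        have h2 : PySem.Set.contains s x = true := by simp [PySem.Set.contains, hs]
        rw [if_pos h1, if_pos h2]; exact ih s
      · have h1 : ¬ PySem.Set.contains (a :: s) x = true := by simp [PySem.Set.contains, hs, hxa]
        have h2 : ¬ PySem.Set.contains s x = true := by simp [PySem.Set.contains, hs]
        rw [if_neg h1, if_neg h2, List.cons_append]; exact ih (s ++ [x])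

theorem ofList_cons_filter (a : String) (l : List String) :
    PySem.Set.ofList (a :: l) = a :: PySem.Set.ofList (l.filter (fun x => x != a)) := by
  simp [PySem.Set.ofList, PySem.Set.empty, PySem.Set.add, List.foldl_cons, foldl_add_cons]

theorem pvPeel_eq (remaining parts : List String) :
    pvPeel remaining parts
      = parts ++ (PySem.Set.ofList remaining).map (fun k => pvFmt k ((remaining.count k : Int))) := by
  match remaining with
  | [] => simp [pvPeel, PySem.Set.ofList, PySem.Set.empty]
  | word :: t =>
    rw [pvPeel]
    have hfil : (word :: t).filter (fun x => x != word) = t.filter (fun x => x != word) := by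
      simp
    rw [hfil, pvPeel_eq (t.filter (fun x => x != word)) _, ofList_cons_filter]
    have hmap : ∀ k ∈ PySem.Set.ofList (t.filter (fun x => x != word)),
        pvFmt k (((t.filter (fun x => x != word)).count k : Int))
          = pvFmt k (((word :: t).count k : Int)) := by
      intro k hk
      have hk' : k ∈ t.filter (fun x => x != word) := (PySem.Set.mem_ofList _ _).mp hk
      have hkw : (k != word) = true := (List.mem_filter.mp hk').2
      have hkw' : k ≠ word := by simpa using hkw
      rw [List.count_filter (by simpa using hkw)]
      simp [hkw'.symm]
    rw [List.map_congr_left hmap]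
    simp [pvFmt, PySem.List.count, List.count_cons_self]
termination_by remaining.length
decreasing_by
  exact Nat.lt_succ_of_le (List.length_filter_le _ _)

-- ===== VERDICT (by name: the statement is the Claim_ definition above) =====
theorem format_stemmed_content_spec : Claim_equal_format_stemmed_content := by
  intro xs _
  unfold Spec_format_stemmed_content format_stemmed_content
  simp only []
  rw [PySem.Dict.items_counter, fmt_foldl_eq_map]
  unfold format_stemmed_content_alt
  rw [pvPeel_eq]
  simp [List.map_map, Function.comp_def]
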